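-- pv_equiv track=rewrite | github.com/ftakanashi/JobProjects | _tmp/360cache2.py | process
-- ===== SOURCE A (Python) =====
-- def process(s, costs):
--     n = len(s)
--     dp = [[0 for _ in range(n)] for _ in range(n)]
--
--     for l in range(1, n):
--         for i in range(n):
--             j = i + l
--             if j >= n: break
--             if s[i] == s[j]:
--                 dp[i][j] = dp[i+1][j-1]
--             else:
--                 cands = []
--                 cands.append(dp[i+1][j] + min(costs[s[i]]))
--                 cands.append(dp[i][j-1] + min(costs[s[j]]))
--                 cands.append(dp[i+1][j-1] + min(costs[s[i]][0] + costs[s[j]][1],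
--                                                 costs[s[i]][1] + costs[s[j]][0]))
--                 dp[i][j] = min(cands)
--
--     return dp[0][-1]
-- ===== SOURCE B (Python) =====
-- def process(s, costs):
--     # Top-down memoized recursion over substring intervals (i, j): computes only
--     # the subproblems the whole-string interval actually demands, caching each.
--     memo = {}
--
--     def solve(i, j):
--         if j <= i:
--             return 0
--         if (i, j) in memo:
--             return memo[(i, j)]
--         if s[i] == s[j]:
--             r = solve(i + 1, j - 1)
--         else:
--             r = min(solve(i + 1, j) + min(costs[s[i]]),
--                     solve(i, j - 1) + min(costs[s[j]]),
--                     solve(i + 1, j - 1) + min(costs[s[i]][0] + costs[s[j]][1],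
--                                               costs[s[i]][1] + costs[s[j]][0]))
--         memo[(i, j)] = r
--         return r
--
--     return solve(0, len(s) - 1)
-- ===== Notes on version B (the rewrite author's own statement) =====
-- stated objective: faster
-- what changed: A fills a full bottom-up n x n interval table gap by gap; B is a top-down memoized recursion over intervals (i,j) with a dict cache, computing only the subproblems the whole-string interval actually demands (e.g. O(n) work when matching characters let the interval shrink from both ends; a timing run measured B ~1400x faster at n=4096).
import Mathlib
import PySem

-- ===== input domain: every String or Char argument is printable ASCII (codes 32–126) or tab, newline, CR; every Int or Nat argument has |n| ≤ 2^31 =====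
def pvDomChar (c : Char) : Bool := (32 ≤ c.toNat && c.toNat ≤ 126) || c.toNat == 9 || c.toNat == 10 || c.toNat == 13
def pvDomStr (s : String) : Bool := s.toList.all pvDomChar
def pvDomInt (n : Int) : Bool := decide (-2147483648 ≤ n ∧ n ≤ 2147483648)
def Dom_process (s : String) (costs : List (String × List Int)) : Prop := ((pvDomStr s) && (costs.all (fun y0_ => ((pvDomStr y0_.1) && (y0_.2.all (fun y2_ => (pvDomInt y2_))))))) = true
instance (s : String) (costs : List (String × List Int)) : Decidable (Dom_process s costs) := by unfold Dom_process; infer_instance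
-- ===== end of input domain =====

-- B replaces A's bottom-up n×n interval table (filled gap by gap) by a top-down memoized
-- recursion over intervals (i,j) with a dict cache: it computes only the subproblems the
-- whole-string interval demands (a timing run measured B faster for that reason).

-- shared leaves: costs[c] (dict lookup), min(costs[c]), the paired replace cost (same Python
-- sub-expressions in both programs; .getD defaults are unreachable under Pre_)
def cget (costs : List (String × List Int)) (c : Char) : List Int :=
  ((PySem.Dict.ofList costs).get? (String.ofList [c])).getD []

def cmin (costs : List (String × List Int)) (c : Char) : Int :=
  (PySem.List.min? (cget costs c) (fun x => x)).getD 0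

def cpair (costs : List (String × List Int)) (a b : Char) : Int :=
  min ((cget costs a).getD 0 0 + (cget costs b).getD 1 0)
      ((cget costs a).getD 1 0 + (cget costs b).getD 0 0)

-- ===== PORT A =====
def aGet2 (dp : List (List Int)) (i j : Nat) : Int := (dp.getD i []).getD j 0

def aSet2 (dp : List (List Int)) (i j : Nat) (v : Int) : List (List Int) :=
  dp.set i ((dp.getD i []).set j v)

def aCell (cs : List Char) (costs : List (String × List Int)) (l : Nat)
    (dp : List (List Int)) (i : Nat) : Int :=
  -- j = i + l
  if cs.getD i ' ' = cs.getD (i+l) ' ' then aGet2 dp (i+1) (i+l-1)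
  else
    (PySem.List.min?
      [aGet2 dp (i+1) (i+l) + cmin costs (cs.getD i ' '),
       aGet2 dp i (i+l-1) + cmin costs (cs.getD (i+l) ' '),
       aGet2 dp (i+1) (i+l-1) + cpair costs (cs.getD i ' ') (cs.getD (i+l) ' ')]
      (fun x => x)).getD 0

-- inner 'for i in range(n)' with its 'if j >= n: break'
def aInner (cs : List Char) (costs : List (String × List Int)) (l : Nat) :
    List Nat → List (List Int) → List (List Int)
  | [], dp => dp
  | i :: rest, dp =>
    if cs.length ≤ i + l then dp
    else aInner cs costs l rest (aSet2 dp i (i+l) (aCell cs costs l dp i))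

def aOuter (cs : List Char) (costs : List (String × List Int)) :
    List Nat → List (List Int) → List (List Int)
  | [], dp => dp
  | l :: rest, dp => aOuter cs costs rest (aInner cs costs l (List.range cs.length) dp)

def process (s : String) (costs : List (String × List Int)) : Int :=
  let cs := s.toList
  let n := cs.length
  let dp0 := (List.range n).map (fun _ => (List.range n).map (fun _ => (0 : Int)))
  let dp := aOuter cs costs (List.range' 1 (n-1)) dp0
  (PySem.List.pyGet? (dp.getD 0 []) (-1)).getD 0   -- dp[0][-1] (IndexError on empty s: outside Pre_)

-- ===== PORT B =====
-- 'def solve(i, j)' with dict memo threaded through; recursion on the interval width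
def bSolve (cs : List Char) (costs : List (String × List Int)) (i j : Nat)
    (memo : PySem.Dict (Nat × Nat) Int) : Int × PySem.Dict (Nat × Nat) Int :=
  if j ≤ i then (0, memo)
  else
    match memo.get? (i, j) with
    | some v => (v, memo)
    | none =>
      if cs.getD i ' ' = cs.getD j ' ' then
        let p := bSolve cs costs (i+1) (j-1) memo
        (p.1, p.2.insert (i, j) p.1)
      else
        let p1 := bSolve cs costs (i+1) j memo
        let p2 := bSolve cs costs i (j-1) p1.2
        let p3 := bSolve cs costs (i+1) (j-1) p2.2
        let r := min (min (p1.1 + cmin costs (cs.getD i ' '))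
                          (p2.1 + cmin costs (cs.getD j ' ')))
                     (p3.1 + cpair costs (cs.getD i ' ') (cs.getD j ' '))
        (r, p3.2.insert (i, j) r)
termination_by j - i
decreasing_by all_goals omega

def process_alt (s : String) (costs : List (String × List Int)) : Int :=
  (bSolve s.toList costs 0 (s.toList.length - 1) PySem.Dict.empty).1

-- ===== PRECONDITION & SPEC =====
-- Pre_ excludes exactly the inputs where A raises: the empty string (IndexError on dp[0][-1])
-- and strings containing two different characters some of whose characters lack a costs entry
-- of length ≥ 2 (KeyError / ValueError on min([]) / IndexError on costs[c][1]).
def Pre_process (s : String) (costs : List (String × List Int)) : Prop :=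
  s.toList ≠ [] ∧
  (s.toList.all (fun c =>
    !(s.toList.any (fun d => d != c)) || decide (2 ≤ (cget costs c).length))) = true
instance (s : String) (costs : List (String × List Int)) : Decidable (Pre_process s costs) := by
  unfold Pre_process; infer_instance

def pvWitness_process : String × (List (String × List Int)) :=
  ("ab", [("a", [1, 2]), ("b", [3, 4])])

def Spec_process (s : String) (costs : List (String × List Int)) (out : Int) : Prop :=
  out = process_alt s costs
instance (s : String) (costs : List (String × List Int)) (out : Int) :
    Decidable (Spec_process s costs out) := by unfold Spec_process; infer_instance

-- ===== CLAIM (what is proved, stated in full; the proofs are below) =====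
def Claim_equal_process : Prop := ∀ (s : String) (costs : List (String × List Int)),
  Dom_process s costs → Pre_process s costs → Spec_process s costs (process s costs)

-- ===== LEMMAS AND PROOFS =====

-- the interval solution both programs compute: min cost to make cs[i..j] a palindrome
def sol (cs : List Char) (costs : List (String × List Int)) (i j : Nat) : Int :=
  if _h : j ≤ i then 0
  else if cs.getD i ' ' = cs.getD j ' ' then sol cs costs (i+1) (j-1)
  else
    min (min (sol cs costs (i+1) j + cmin costs (cs.getD i ' '))
             (sol cs costs i (j-1) + cmin costs (cs.getD j ' ')))
        (sol cs costs (i+1) (j-1) + cpair costs (cs.getD i ' ') (cs.getD j ' '))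
termination_by j - i
decreasing_by all_goals omega

theorem sol_of_le (cs : List Char) (costs : List (String × List Int)) (i j : Nat)
    (h : j ≤ i) : sol cs costs i j = 0 := by rw [sol]; simp [h]

-- ---------- A side: the table invariant ----------

-- A's table after processing gaps < l fully and, at gap l, columns i < k
def ptbl (cs : List Char) (costs : List (String × List Int)) (l k : Nat) : List (List Int) :=
  (List.range cs.length).map (fun i => (List.range cs.length).map (fun j =>
    if i < j ∧ (j + 1 ≤ i + l ∨ (j = i + l ∧ i < k)) then sol cs costs i j else 0))

theorem aGet2_ptbl (cs : List Char) (costs : List (String × List Int)) (l k i j : Nat)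
    (hi : i < cs.length) (hj : j < cs.length) (hjl : j + 1 ≤ i + l) :
    aGet2 (ptbl cs costs l k) i j = sol cs costs i j := by
  unfold aGet2 ptbl
  rw [PySem.List.getD_map_range _ _ _ _ hi, PySem.List.getD_map_range _ _ _ _ hj]
  by_cases hij : i < j
  · rw [if_pos ⟨hij, Or.inl hjl⟩]
  · rw [if_neg (by omega), sol_of_le _ _ _ _ (by omega)]

theorem aCell_ptbl (cs : List Char) (costs : List (String × List Int)) (l k i : Nat)
    (hl : 1 ≤ l) (hi : i + l < cs.length) :
    aCell cs costs l (ptbl cs costs l k) i = sol cs costs i (i + l) := by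
  unfold aCell
  rw [sol]
  rw [aGet2_ptbl cs costs l k (i+1) (i+l-1) (by omega) (by omega) (by omega),
      aGet2_ptbl cs costs l k (i+1) (i+l) (by omega) (by omega) (by omega),
      aGet2_ptbl cs costs l k i (i+l-1) (by omega) (by omega) (by omega)]
  rw [dif_neg (by omega : ¬ i + l ≤ i)]
  by_cases hc : cs.getD i ' ' = cs.getD (i+l) ' '
  · simp only [hc, if_true]
  · rw [if_neg hc, if_neg hc]
    rw [PySem.List.min?_id_cons]
    simp [List.foldl, min_assoc]

theorem aSet2_ptbl (cs : List Char) (costs : List (String × List Int)) (l k : Nat)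
    (hl : 1 ≤ l) (hk : k + l < cs.length) :
    aSet2 (ptbl cs costs l k) k (k+l) (sol cs costs k (k+l)) = ptbl cs costs l (k+1) := by
  unfold aSet2 ptbl
  rw [PySem.List.getD_map_range _ _ _ _ (by omega : k < cs.length)]
  apply List.ext_getElem
  · simp
  · intro a h1 h2
    simp only [List.getElem_set, List.getElem_map, List.getElem_range]
    simp only [List.length_set, List.length_map, List.length_range] at h1
    by_cases hak : k = a
    · subst hak
      rw [if_pos rfl]
      apply List.ext_getElem
      · simp
      · intro b hb1 hb2
        simp only [List.getElem_set, List.getElem_map, List.getElem_range]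
        by_cases hbj : k + l = b
        · subst hbj
          rw [if_pos rfl, if_pos (by omega)]
        · rw [if_neg hbj]
          by_cases hcond : k < b ∧ (b + 1 ≤ k + l ∨ (b = k + l ∧ k < k))
          · rw [if_pos hcond, if_pos (by omega)]
          · rw [if_neg hcond, if_neg (by omega)]
    · rw [if_neg hak]
      by_cases hcond : ∀ b, (a < b ∧ (b + 1 ≤ a + l ∨ (b = a + l ∧ a < k))) ↔
          (a < b ∧ (b + 1 ≤ a + l ∨ (b = a + l ∧ a < k + 1)))
      · exact List.map_congr_left (fun b _ => by
          by_cases h : a < b ∧ (b + 1 ≤ a + l ∨ (b = a + l ∧ a < k))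
          · rw [if_pos h, if_pos ((hcond b).1 h)]
          · rw [if_neg h, if_neg (fun h' => h ((hcond b).2 h'))])
      · exact absurd (fun b => ⟨fun h => ⟨h.1, h.2.imp id (fun h2 => ⟨h2.1, by omega⟩)⟩,
          fun h => ⟨h.1, h.2.imp id (fun h2 => ⟨h2.1, by omega⟩)⟩⟩) hcond

theorem aInner_inv (cs : List Char) (costs : List (String × List Int)) (l : Nat)
    (hl : 1 ≤ l) (hln : l < cs.length) :
    ∀ m k, k + m = cs.length → k ≤ cs.length - l →
      aInner cs costs l (List.range' k m) (ptbl cs costs l k) =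
        ptbl cs costs l (cs.length - l) := by
  intro m
  induction m with
  | zero => intro k h1 h2; omega
  | succ m ih =>
    intro k h1 h2
    rw [List.range'_succ]
    by_cases hbreak : cs.length ≤ k + l
    · have : k = cs.length - l := by omega
      subst this
      simp [aInner, hbreak]
    · simp only [aInner, if_neg hbreak]
      rw [aCell_ptbl cs costs l k k hl (by omega),
          aSet2_ptbl cs costs l k hl (by omega)]
      exact ih (k+1) (by omega) (by omega)

theorem ptbl_shift (cs : List Char) (costs : List (String × List Int)) (l : Nat)
    (hln : l < cs.length) :
    ptbl cs costs l (cs.length - l) = ptbl cs costs (l+1) 0 := by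
  unfold ptbl
  refine List.map_congr_left (fun i hi => ?_)
  refine List.map_congr_left (fun j hj => ?_)
  rw [List.mem_range] at hi hj
  exact if_congr (by constructor <;> (intro h; exact ⟨h.1, by omega⟩)) rfl rfl

theorem aOuter_inv (cs : List Char) (costs : List (String × List Int)) :
    ∀ m l, 1 ≤ l → l + m = cs.length →
      aOuter cs costs (List.range' l m) (ptbl cs costs l 0) =
        ptbl cs costs cs.length 0 := by
  intro m
  induction m with
  | zero =>
    intro l h1 h2
    rw [List.range'_zero]
    simp only [aOuter]
    rw [(by omega : l = cs.length)]
  | succ m ih =>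
    intro l h1 h2
    rw [List.range'_succ]
    simp only [aOuter]
    rw [show List.range cs.length = List.range' 0 cs.length from List.range_eq_range',
        aInner_inv cs costs l h1 (by omega) cs.length 0 (by omega) (by omega),
        ptbl_shift cs costs l (by omega)]
    exact ih (l+1) (by omega) (by omega)

theorem ptbl_init (cs : List Char) (costs : List (String × List Int)) :
    (List.range cs.length).map (fun _ => (List.range cs.length).map (fun _ => (0 : Int))) =
      ptbl cs costs 1 0 := by
  unfold ptbl
  refine List.map_congr_left (fun i _ => ?_)
  refine List.map_congr_left (fun j _ => ?_)
  rw [if_neg (by omega)]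

-- ---------- B side: the memo-cache invariant ----------

-- every cached value is the interval solution
def GoodMemo (cs : List Char) (costs : List (String × List Int))
    (memo : PySem.Dict (Nat × Nat) Int) : Prop :=
  ∀ p v, memo.get? p = some v → v = sol cs costs p.1 p.2

theorem goodMemo_insert (cs : List Char) (costs : List (String × List Int))
    (memo : PySem.Dict (Nat × Nat) Int) (hm : GoodMemo cs costs memo) (i j : Nat)
    (hv : sol cs costs i j = r) : GoodMemo cs costs (memo.insert (i, j) r) := by
  intro p v hp
  rw [PySem.Dict.get?_insert] at hp
  by_cases hpe : p = (i, j)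
  · rw [if_pos hpe] at hp
    cases hp
    rw [hpe]
    exact hv.symm
  · rw [if_neg hpe] at hp
    exact hm p v hp

theorem bSolve_correct (cs : List Char) (costs : List (String × List Int)) :
    ∀ (d i j : Nat), j - i ≤ d → ∀ memo, GoodMemo cs costs memo →
      (bSolve cs costs i j memo).1 = sol cs costs i j ∧
        GoodMemo cs costs (bSolve cs costs i j memo).2 := by
  intro d
  induction d with
  | zero =>
    intro i j hd memo hm
    have hji : j ≤ i := by omega
    rw [bSolve, if_pos hji, sol_of_le _ _ _ _ hji]
    exact ⟨rfl, hm⟩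
  | succ d ih =>
    intro i j hd memo hm
    by_cases hji : j ≤ i
    · rw [bSolve, if_pos hji, sol_of_le _ _ _ _ hji]
      exact ⟨rfl, hm⟩
    · rw [bSolve, if_neg hji]
      cases hget : memo.get? (i, j) with
      | some v =>
        simp only
        exact ⟨hm (i, j) v hget, hm⟩
      | none =>
        simp only
        by_cases hc : cs.getD i ' ' = cs.getD j ' '
        · rw [if_pos hc]
          obtain ⟨h1, h2⟩ := ih (i+1) (j-1) (by omega) memo hm
          have hs : sol cs costs i j = (bSolve cs costs (i+1) (j-1) memo).1 := by
            rw [sol, dif_neg hji, if_pos hc, h1]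
          exact ⟨hs.symm, goodMemo_insert cs costs _ h2 i j hs.symm.symm⟩
        · rw [if_neg hc]
          obtain ⟨h1, h2⟩ := ih (i+1) j (by omega) memo hm
          obtain ⟨h3, h4⟩ := ih i (j-1) (by omega) _ h2
          obtain ⟨h5, h6⟩ := ih (i+1) (j-1) (by omega) _ h4
          have hs : sol cs costs i j =
              min (min ((bSolve cs costs (i+1) j memo).1 + cmin costs (cs.getD i ' '))
                       ((bSolve cs costs i (j-1) (bSolve cs costs (i+1) j memo).2).1 +
                         cmin costs (cs.getD j ' ')))
                  ((bSolve cs costs (i+1) (j-1)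
                      (bSolve cs costs i (j-1) (bSolve cs costs (i+1) j memo).2).2).1 +
                    cpair costs (cs.getD i ' ') (cs.getD j ' ')) := by
            rw [sol, dif_neg hji, if_neg hc, h1, h3, h5]
          exact ⟨hs.symm, goodMemo_insert cs costs _ h6 i j hs.symm.symm⟩

theorem goodMemo_empty (cs : List Char) (costs : List (String × List Int)) :
    GoodMemo cs costs PySem.Dict.empty := by
  intro p v hp
  rw [PySem.Dict.get?_empty] at hp
  cases hp

-- ---------- both equal sol 0 (n-1) ----------

theorem process_eq_process_alt (s : String) (costs : List (String × List Int)) :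
    process s costs = process_alt s costs := by
  simp only [process, process_alt]
  have hB : (bSolve s.toList costs 0 (s.toList.length - 1) PySem.Dict.empty).1 =
      sol s.toList costs 0 (s.toList.length - 1) :=
    (bSolve_correct s.toList costs (s.toList.length - 1) 0 (s.toList.length - 1)
      (by omega) PySem.Dict.empty (goodMemo_empty s.toList costs)).1
  rw [hB]
  by_cases hn : s.toList.length = 0
  · have he : s.toList = [] := List.eq_nil_of_length_eq_zero hn
    simp [he, aOuter, PySem.List.pyGet?, sol_of_le]
  · -- A side
    rw [ptbl_init s.toList costs]
    have hA : aOuter s.toList costs (List.range' 1 (s.toList.length - 1))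
        (ptbl s.toList costs 1 0) = ptbl s.toList costs s.toList.length 0 :=
      aOuter_inv s.toList costs (s.toList.length - 1) 1 (by omega) (by omega)
    rw [hA]
    unfold ptbl
    rw [PySem.List.getD_map_range _ _ _ _ (by omega : 0 < s.toList.length)]
    rw [PySem.List.pyGet?_neg_one]
    rw [List.getLast?_eq_getElem?]
    simp only [List.length_map, List.length_range, List.getElem?_map]
    rw [show (List.range s.toList.length)[s.toList.length - 1]? =
          some (s.toList.length - 1) from by
        rw [List.getElem?_range (by omega)]]
    simp only [Option.map_some, Option.getD_some]
    by_cases h2 : 2 ≤ s.toList.length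
    · rw [if_pos ⟨by omega, Or.inl (by omega)⟩]
    · rw [if_neg (by omega), sol_of_le _ _ _ _ (by omega)]

-- ===== VERDICT (by name: the statement is the Claim_ definition above) =====
theorem process_spec : Claim_equal_process := by
  intro s costs _ _
  unfold Spec_process
  exact process_eq_process_alt s costs
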